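-- pv_equiv track=rewrite | github.com/Abjad/abjad | trunk/abjad/tools/listtools/get_shared_numeric_sign.py | get_shared_numeric_sign
-- ===== SOURCE A (Python) =====
-- def get_shared_numeric_sign(l):
--    '''Return ``1`` when all elements in `l` are positive::
--
--       abjad> listtools.get_shared_numeric_sign([1, 2, 3])
--       1
--
--    Return ``-1`` when all elements in `l` are negative::
--
--       abjad> listtools.get_shared_numeric_sign([-1, -2, -3])
--       -1
--
--    Return ``0`` when `l` is empty::
--
--       abjad> listtools.get_shared_numeric_sign([ ])
--       0
--
--    Otherwise, return none::
--
--       abjad> listtools.get_shared_numeric_sign([1, 2, -3]) is None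
--       True
--
--    .. versionchanged:: 1.1.2
--       renamed ``listtools.sign( )`` to
--       ``listtools.get_shared_numeric_sign( )``.
--    '''
--
--    if len(l) == 0:
--       return 0
--    elif all([0 < x for x in l]):
--       return 1
--    elif all([x < 0 for x in l]):
--       return -1
--    else:
--       return None
-- ===== SOURCE B (Python) =====
-- def get_shared_numeric_sign(l):
--     if not l:
--         return 0
--     s = (l[0] > 0) - (l[0] < 0)
--     if s == 0:
--         return None
--     for x in l[1:]:
--         if s * x <= 0:
--             return None
--     return s
-- ===== Notes on version B (the rewrite author's own statement) =====
-- stated objective: alternative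
-- what changed: B takes the sign of the first element and verifies the rest in a single short-circuiting pass via the multiplicative test s*x > 0, instead of A's two staged all(...) predicate scans over the whole list.
import Mathlib
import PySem

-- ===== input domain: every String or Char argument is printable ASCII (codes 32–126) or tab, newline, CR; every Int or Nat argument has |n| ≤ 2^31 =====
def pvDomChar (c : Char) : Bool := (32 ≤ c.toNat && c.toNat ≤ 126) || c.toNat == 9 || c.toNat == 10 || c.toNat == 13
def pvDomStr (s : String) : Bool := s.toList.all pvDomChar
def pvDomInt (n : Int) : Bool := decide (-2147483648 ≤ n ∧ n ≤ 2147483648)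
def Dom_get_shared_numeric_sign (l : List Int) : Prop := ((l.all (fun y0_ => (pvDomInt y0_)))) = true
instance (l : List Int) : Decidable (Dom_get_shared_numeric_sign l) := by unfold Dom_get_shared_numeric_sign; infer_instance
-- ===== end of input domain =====

-- B checks the rest of the list against the first element's sign in one short-circuiting pass (s*x > 0), instead of A's two staged all(...) scans (alternative, same cost).


-- ===== PORT A =====
-- if len(l)==0: return 0; elif all([0<x for x in l]): 1; elif all([x<0 for x in l]): -1; else None
def get_shared_numeric_sign (l : List Int) : Option Int :=
  if l.length = 0 then some 0
  else if (l.map (fun x => decide (0 < x))).all (fun b => b) then some 1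
  else if (l.map (fun x => decide (x < 0))).all (fun b => b) then some (-1)
  else none

-- ===== PORT B =====
-- the 'for x in l[1:]' loop with its early 'return None'
def gsnsLoop (s : Int) : List Int → Option Int
  | [] => some s
  | x :: xs => if s * x ≤ 0 then none else gsnsLoop s xs

def get_shared_numeric_sign_alt (l : List Int) : Option Int :=
  match l with
  | [] => some 0
  | x :: rest =>
    let s : Int := (if 0 < x then 1 else 0) - (if x < 0 then 1 else 0)
    if s = 0 then none
    else gsnsLoop s rest

-- ===== PRECONDITION & SPEC =====
def Spec_get_shared_numeric_sign (l : List Int) (out : Option Int) : Prop := out = get_shared_numeric_sign_alt l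
instance (l : List Int) (out : Option Int) : Decidable (Spec_get_shared_numeric_sign l out) := by unfold Spec_get_shared_numeric_sign; infer_instance

-- ===== CLAIM (what is proved, stated in full; the proofs are below) =====
def Claim_equal_get_shared_numeric_sign : Prop := ∀ (l : List Int), Dom_get_shared_numeric_sign l → Spec_get_shared_numeric_sign l (get_shared_numeric_sign l)

-- ===== LEMMAS AND PROOFS =====
lemma gsnsLoop_eq (s : Int) (xs : List Int) :
    gsnsLoop s xs = if ∀ x ∈ xs, 0 < s * x then some s else none := by
  induction xs with
  | nil => simp [gsnsLoop]
  | cons x xs ih =>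
    by_cases h : s * x ≤ 0
    · have : ¬ ∀ y ∈ x :: xs, 0 < s * y := by
        intro H; exact absurd (H x (by simp)) (by omega)
      simp [gsnsLoop, h]
    · simp only [gsnsLoop, if_neg h, ih]
      by_cases hr : ∀ y ∈ xs, 0 < s * y
      · have : ∀ y ∈ x :: xs, 0 < s * y := by
          intro y hy; rcases List.mem_cons.mp hy with rfl | hm
          · omega
          · exact hr y hm
        simp [this]
      · simp [hr]

lemma allA (l : List Int) (p : Int → Prop) [DecidablePred p] :
    ((l.map (fun x => decide (p x))).all (fun b => b) = true) ↔ ∀ x ∈ l, p x := by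
  simp [List.all_eq_true]

-- ===== VERDICT (by name: the statement is the Claim_ definition above) =====
theorem get_shared_numeric_sign_spec : Claim_equal_get_shared_numeric_sign := by
  intro l _
  unfold Spec_get_shared_numeric_sign get_shared_numeric_sign get_shared_numeric_sign_alt
  match l with
  | [] => simp
  | x :: rest =>
    simp only [List.length_cons, Nat.succ_ne_zero, if_false, gsnsLoop_eq]
    have hA1 := allA (x :: rest) (fun y => 0 < y)
    have hA2 := allA (x :: rest) (fun y => y < 0)
    rcases lt_trichotomy x 0 with hx | hx | hx
    · -- x < 0 : s = -1
      have hs : ((if (0:Int) < x then (1:Int) else 0) - (if x < 0 then 1 else 0)) = -1 := by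
        rw [if_neg (by omega), if_pos hx]; norm_num
      rw [hs, if_neg (show (-1:Int) ≠ 0 by norm_num)]
      have hnp : ¬ (∀ y ∈ x :: rest, 0 < y) := fun H => absurd (H x (by simp)) (by omega)
      by_cases c2 : ∀ y ∈ rest, y < 0
      · have hall : ∀ y ∈ x :: rest, y < 0 := by
          intro y hy; rcases List.mem_cons.mp hy with rfl | hm
          · exact hx
          · exact c2 y hm
        have hb : ∀ y ∈ rest, 0 < (-1:Int) * y := fun y hy => by have := c2 y hy; omega
        rw [if_neg (fun h => hnp (hA1.mp h)), if_pos (hA2.mpr hall), if_pos hb]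
      · have hnn : ¬ (∀ y ∈ x :: rest, y < 0) :=
          fun H => c2 (fun y hy => H y (List.mem_cons_of_mem _ hy))
        have hb : ¬ (∀ y ∈ rest, 0 < (-1:Int) * y) :=
          fun H => c2 (fun y hy => by have := H y hy; omega)
        rw [if_neg (fun h => hnp (hA1.mp h)), if_neg (fun h => hnn (hA2.mp h)), if_neg hb]
    · -- x = 0 : s = 0, both sides none
      subst hx
      have hnp : ¬ (∀ y ∈ (0:Int) :: rest, 0 < y) := fun H => absurd (H 0 (by simp)) (by omega)
      have hnn : ¬ (∀ y ∈ (0:Int) :: rest, y < 0) := fun H => absurd (H 0 (by simp)) (by omega)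
      rw [if_neg (fun h => hnp (hA1.mp h)), if_neg (fun h => hnn (hA2.mp h)),
          if_pos (show ((if (0:Int) < 0 then (1:Int) else 0) - (if (0:Int) < 0 then 1 else 0)) = 0 by norm_num)]
    · -- 0 < x : s = 1
      have hs : ((if (0:Int) < x then (1:Int) else 0) - (if x < 0 then 1 else 0)) = 1 := by
        rw [if_pos hx, if_neg (by omega)]; norm_num
      rw [hs, if_neg (show (1:Int) ≠ 0 by norm_num)]
      have hnn : ¬ (∀ y ∈ x :: rest, y < 0) := fun H => absurd (H x (by simp)) (by omega)
      by_cases c1 : ∀ y ∈ rest, 0 < y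
      · have hall : ∀ y ∈ x :: rest, 0 < y := by
          intro y hy; rcases List.mem_cons.mp hy with rfl | hm
          · exact hx
          · exact c1 y hm
        have hb : ∀ y ∈ rest, 0 < (1:Int) * y := fun y hy => by have := c1 y hy; omega
        rw [if_pos (hA1.mpr hall), if_pos hb]
      · have hnp : ¬ (∀ y ∈ x :: rest, 0 < y) :=
          fun H => c1 (fun y hy => H y (List.mem_cons_of_mem _ hy))
        have hb : ¬ (∀ y ∈ rest, 0 < (1:Int) * y) :=
          fun H => c1 (fun y hy => by have := H y hy; omega)
        rw [if_neg (fun h => hnp (hA1.mp h)), if_neg (fun h => hnn (hA2.mp h)), if_neg hb]
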